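-- pv_equiv track=rewrite | github.com/door2u/Python | Math/node.py | Vari
-- ===== SOURCE A (Python) =====
-- def Vari(expr, oper = "^"):
-- 	retu = ""
-- 	operFlag = False
-- 	a = 0
-- 	while a < len(expr):
-- 		if expr[a].isnumeric():
-- 			inde = False
-- 			b = a
-- 			while b >= 0:
-- 				if expr[b] == "@":
-- 					inde = True
-- 					break
-- 				if expr[b].isnumeric() == False:
-- 					break
-- 				b -= 1
-- 			if inde == False:
-- 				retu += expr[a]
-- 		if expr[a] == "/" or expr[a] == "-" or expr[a].isalpha():
-- 			retu += expr[a]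
-- 		if OperIs__(expr[a]) or a == len(expr) - 1:
-- 			if expr[a] == oper:
-- 				operFlag = True
-- 			if operFlag and retu != "":
-- 				break
-- 		a += 1
-- 	if a == len(expr):
-- 		retu = None
-- 	return retu
--
-- def OperIs__(char):
-- 	return char == "^" or char == "*" or char == "+"
-- ===== SOURCE B (Python) =====
-- def Vari(expr, oper="^"):
--     # One forward pass: a carried flag marks whether the current digit run is
--     # preceded by '@' (computed once at each run start), replacing A's backward scan.
--     retu = ""
--     operFlag = False
--     in_excluded_run = False
--     n = len(expr)
--     for a in range(n):
--         c = expr[a]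
--         if c.isnumeric():
--             if a == 0 or not expr[a - 1].isnumeric():
--                 in_excluded_run = a > 0 and expr[a - 1] == "@"
--             if not in_excluded_run:
--                 retu += c
--         if c == "/" or c == "-" or c.isalpha():
--             retu += c
--         if c in "^*+" or a == n - 1:
--             if c == oper:
--                 operFlag = True
--             if operFlag and retu != "":
--                 return retu
--     return None
-- ===== Notes on version B (the rewrite author's own statement) =====
-- stated objective: faster
-- what changed: A decides whether each digit is excluded by rescanning backward through the digit run from every digit position; B makes a single forward pass that computes the exclusion flag once at each digit-run start (from the preceding marker character) and carries it through the run, with an early return at the break.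
import Mathlib
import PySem

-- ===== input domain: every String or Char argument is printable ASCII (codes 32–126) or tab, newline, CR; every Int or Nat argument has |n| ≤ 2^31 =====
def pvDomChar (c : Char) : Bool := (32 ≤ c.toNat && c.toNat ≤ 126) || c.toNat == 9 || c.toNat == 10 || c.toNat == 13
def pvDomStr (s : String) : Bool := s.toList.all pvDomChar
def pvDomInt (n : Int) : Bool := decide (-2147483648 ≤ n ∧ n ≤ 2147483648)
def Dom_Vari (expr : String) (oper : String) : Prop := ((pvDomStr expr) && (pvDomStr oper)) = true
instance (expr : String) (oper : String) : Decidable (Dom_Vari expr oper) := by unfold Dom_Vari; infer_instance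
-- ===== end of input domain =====

-- B replaces A's per-digit backward scan with a single forward pass that carries a
-- run-exclusion flag computed once at each digit-run start (objective: one pass instead
-- of a nested backward scan).

-- ===== PORT A =====
-- str.isnumeric, exact on the printable-ASCII domain (the ASCII numerics are '0'..'9')
def chIsNum (c : Char) : Bool := '0' ≤ c && c ≤ '9'
-- str.isalpha, exact on the printable-ASCII domain
def chIsAlpha (c : Char) : Bool := ('a' ≤ c && c ≤ 'z') || ('A' ≤ c && c ≤ 'Z')
def OperIs__ (c : Char) : Bool := c == '^' || c == '*' || c == '+'

-- A's inner backward while-loop over b (the index is in range whenever it is read)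
def backScan (l : List Char) : Nat → Bool
  | 0 => l.getD 0 ' ' == '@'
  | b + 1 =>
    let c := l.getD (b + 1) ' '
    if c == '@' then true
    else if chIsNum c == false then false
    else backScan l b

-- A's outer while-loop: returns (retu, a) at exit (break leaves a < len, else a = len)
def loopA (l : List Char) (oper : String) (retu : List Char) (operFlag : Bool)
    (a : Nat) : List Char × Nat :=
  if h : a < l.length then
    let c := l.getD a ' '
    let retu1 := if chIsNum c && !backScan l a then retu ++ [c] else retu
    let retu2 := if c == '/' || c == '-' || chIsAlpha c then retu1 ++ [c] else retu1
    if OperIs__ c || a == l.length - 1 then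
      let operFlag1 := if String.mk [c] == oper then true else operFlag
      if operFlag1 && retu2 != [] then (retu2, a)
      else loopA l oper retu2 operFlag1 (a + 1)
    else loopA l oper retu2 operFlag (a + 1)
  else (retu, a)
termination_by l.length - a

def Vari (expr : String) (oper : String) : Option String :=
  let l := expr.toList
  let p := loopA l oper [] false 0
  if p.2 == l.length then none else some (String.mk p.1)

-- ===== PORT B =====
-- B's single forward pass; `excl` is the carried run-exclusion flag, recomputed at
-- each digit-run start from the preceding character; early return at the break.
def loopB (l : List Char) (oper : String) (retu : List Char) (operFlag : Bool)
    (excl : Bool) (a : Nat) : Option (List Char) :=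
  if h : a < l.length then
    let c := l.getD a ' '
    let excl1 :=
      if chIsNum c then
        if a == 0 || !chIsNum (l.getD (a - 1) ' ') then
          decide (0 < a) && (l.getD (a - 1) ' ' == '@')
        else excl
      else excl
    let retu1 := if chIsNum c && !excl1 then retu ++ [c] else retu
    let retu2 := if c == '/' || c == '-' || chIsAlpha c then retu1 ++ [c] else retu1
    if ("^*+".toList.contains c) || a == l.length - 1 then
      let operFlag1 := if String.mk [c] == oper then true else operFlag
      if operFlag1 && retu2 != [] then some retu2
      else loopB l oper retu2 operFlag1 excl1 (a + 1)
    else loopB l oper retu2 operFlag excl1 (a + 1)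
  else none
termination_by l.length - a

def Vari_alt (expr : String) (oper : String) : Option String :=
  (loopB expr.toList oper [] false false 0).map String.mk

-- ===== PRECONDITION & SPEC =====
def Spec_Vari (expr : String) (oper : String) (out : Option String) : Prop := out = Vari_alt expr oper
instance (expr : String) (oper : String) (out : Option String) : Decidable (Spec_Vari expr oper out) := by unfold Spec_Vari; infer_instance

-- ===== CLAIM (what is proved, stated in full; the proofs are below) =====
def Claim_equal_Vari : Prop := ∀ (expr : String) (oper : String), Dom_Vari expr oper → Spec_Vari expr oper (Vari expr oper)

-- ===== LEMMAS AND PROOFS =====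

lemma chIsNum_ne_at (c : Char) (h : chIsNum c = true) : (c == '@') = false := by
  by_cases hc : c = '@'
  · subst hc; simp [chIsNum] at h
  · simp [hc]

-- inside a digit run, A's backward scan steps down by one
lemma backScan_cont (l : List Char) (b : Nat)
    (h : chIsNum (l.getD (b + 1) ' ') = true) :
    backScan l (b + 1) = backScan l b := by
  simp only [backScan]
  rw [chIsNum_ne_at _ h, h]
  rfl

-- at a digit-run start, A's backward scan reduces to "preceding char is '@'"
lemma backScan_prev_not (l : List Char) (b : Nat)
    (hn : chIsNum (l.getD (b + 1) ' ') = true)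
    (hp : chIsNum (l.getD b ' ') = false) :
    backScan l (b + 1) = (l.getD b ' ' == '@') := by
  rw [backScan_cont l b hn]
  cases b with
  | zero => rfl
  | succ b' =>
    simp only [backScan, hp]
    cases hb : (l.getD (b' + 1) ' ' == '@') <;> rfl

-- B's flag update yields exactly A's backward-scan value at a numeric position
lemma exclUpdate (l : List Char) (a : Nat) (excl : Bool)
    (hinv : ∀ b, a = b + 1 → chIsNum (l.getD b ' ') = true → excl = backScan l b)
    (hn : chIsNum (l.getD a ' ') = true) :
    (if a == 0 || !chIsNum (l.getD (a - 1) ' ') then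
        decide (0 < a) && (l.getD (a - 1) ' ' == '@')
      else excl) = backScan l a := by
  cases a with
  | zero =>
    rw [if_pos (by simp)]
    have h0 : backScan l 0 = (l.getD 0 ' ' == '@') := rfl
    rw [h0, chIsNum_ne_at _ hn]
    simp
  | succ b =>
    simp only [Nat.add_sub_cancel]
    cases hp : chIsNum (l.getD b ' ') with
    | true =>
      rw [if_neg (by simp [hp]), hinv b rfl hp, backScan_cont l b hn]
    | false =>
      rw [if_pos (by simp [hp]), backScan_prev_not l b hn hp]
      simp

lemma contains_eq_OperIs (c : Char) : ("^*+".toList.contains c) = OperIs__ c := by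
  show (['^', '*', '+'].contains c) = OperIs__ c
  simp only [List.contains, OperIs__, List.elem_cons, List.elem_nil]
  cases c == '^' <;> cases c == '*' <;> cases c == '+' <;> rfl

-- the two loops agree, given the run-flag invariant for `excl`
lemma loop_eq (k : Nat) : ∀ (l : List Char) (oper : String) (retu : List Char)
    (operFlag excl : Bool) (a : Nat), a ≤ l.length → l.length - a ≤ k →
    (∀ b, a = b + 1 → chIsNum (l.getD b ' ') = true → excl = backScan l b) →
    loopB l oper retu operFlag excl a =
      (if (loopA l oper retu operFlag a).2 = l.length then none
       else some (loopA l oper retu operFlag a).1) := by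
  induction k with
  | zero =>
    intro l oper retu operFlag excl a ha hk _
    have he : a = l.length := by omega
    subst he
    rw [loopA, loopB, dif_neg (by omega), dif_neg (by omega), if_pos rfl]
  | succ k ih =>
    intro l oper retu operFlag excl a ha hk hinv
    by_cases h : a < l.length
    · rw [loopA, loopB]
      simp only [dif_pos h]
      have hcond : (chIsNum (l.getD a ' ') &&
          !(if chIsNum (l.getD a ' ') then
              if a == 0 || !chIsNum (l.getD (a - 1) ' ') then
                decide (0 < a) && (l.getD (a - 1) ' ' == '@')
              else excl
            else excl)) =
          (chIsNum (l.getD a ' ') && !backScan l a) := by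
        cases hn : chIsNum (l.getD a ' ') with
        | false => simp
        | true => rw [if_pos rfl, exclUpdate l a excl hinv hn]
      rw [hcond, contains_eq_OperIs]
      have hinv' : ∀ b, a + 1 = b + 1 → chIsNum (l.getD b ' ') = true →
          (if chIsNum (l.getD a ' ') then
              if a == 0 || !chIsNum (l.getD (a - 1) ' ') then
                decide (0 < a) && (l.getD (a - 1) ' ' == '@')
              else excl
            else excl) = backScan l b := by
        intro b hb hnb
        have hba : b = a := by omega
        subst hba
        rw [if_pos hnb]
        exact exclUpdate l b excl hinv hnb
      split
      · split <;> split <;> split <;> split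
        all_goals first
          | exact ih l oper _ _ _ (a + 1) (by omega) (by omega) hinv'
          | (rw [if_neg (show ¬(a = l.length) by omega)])
      · exact ih l oper _ _ _ (a + 1) (by omega) (by omega) hinv'
    · have he : a = l.length := by omega
      subst he
      rw [loopA, loopB, dif_neg (by omega), dif_neg (by omega), if_pos rfl]

-- ===== VERDICT (by name: the statement is the Claim_ definition above) =====
theorem Vari_spec : Claim_equal_Vari := by
  intro expr oper _
  show Vari expr oper = Vari_alt expr oper
  unfold Vari Vari_alt
  rw [loop_eq expr.toList.length expr.toList oper [] false false 0 (by omega) (by omega)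
    (fun b hb => by omega)]
  by_cases hq : (loopA expr.toList oper [] false 0).2 = expr.length <;> simp [hq]
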